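-- pv_equiv track=rewrite | github.com/papelearningml/leetcode-sync | src/github_sync.py | _get_best_submissions
-- ===== SOURCE A (Python) =====
-- def _get_best_submissions(submissions):
--     best_submissions = {}
--     for sub in submissions:
--         title_slug = sub['titleSlug']
--         if title_slug not in best_submissions:
--             best_submissions[title_slug] = sub
--         else:
--             best_runtime = best_submissions[title_slug]['runtime']
--             best_memory = best_submissions[title_slug]['memory']
--             current_runtime = sub['runtime']
--             current_memory = sub['memory']
--
--             # Choose the submission with better performance:
--             if (current_runtime < best_runtime) or (current_runtime == best_runtime and current_memory < best_memory):
--                 best_submissions[title_slug] = sub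
--     return best_submissions
-- ===== SOURCE B (Python) =====
-- def _get_best_submissions(submissions):
--     groups = {}
--     for sub in submissions:
--         groups.setdefault(sub['titleSlug'], []).append(sub)
--     best = {}
--     for slug, subs in groups.items():
--         winner = subs[0]
--         for sub in subs[1:]:
--             if (sub['runtime'], sub['memory']) < (winner['runtime'], winner['memory']):
--                 winner = sub
--         best[slug] = winner
--     return best
-- ===== Notes on version B (the rewrite author's own statement) =====
-- stated objective: alternative
-- what changed: B replaces A's interleaved compare-and-replace dict loop by two passes: first bucket all submissions per titleSlug into a grouping dict, then reduce each group to its winner with a linear scan comparing (runtime, memory) tuples (strict comparison keeps the first minimal element, matching A).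
import Mathlib
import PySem

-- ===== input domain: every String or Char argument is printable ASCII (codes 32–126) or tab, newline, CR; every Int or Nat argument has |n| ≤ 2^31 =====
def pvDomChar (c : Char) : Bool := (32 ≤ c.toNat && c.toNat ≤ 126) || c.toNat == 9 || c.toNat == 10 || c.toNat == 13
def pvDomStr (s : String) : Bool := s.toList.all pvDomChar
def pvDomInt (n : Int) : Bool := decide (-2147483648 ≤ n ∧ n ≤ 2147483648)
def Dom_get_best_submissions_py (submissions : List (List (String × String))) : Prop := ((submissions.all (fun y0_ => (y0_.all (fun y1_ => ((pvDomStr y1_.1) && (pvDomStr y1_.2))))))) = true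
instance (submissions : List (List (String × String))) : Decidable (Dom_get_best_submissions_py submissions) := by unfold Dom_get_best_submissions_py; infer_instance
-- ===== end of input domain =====

-- B groups the submissions per titleSlug in one pass, then reduces each group to its winner by a
-- linear (runtime, memory) tuple-comparison scan, instead of A's interleaved compare-and-replace loop.

-- ===== PORT A =====
-- sub[k]: first-match lookup in the association list; totalised with default "" — Pre_ guarantees the
-- key is present wherever the Python actually reads it, so the default never shows in a claimed result.
def pvVal (sub : List (String × String)) (k : String) : String :=
  ((sub.find? (fun p => p.1 == k)).map (fun p => p.2)).getD ""

def pvBetter (sub best : List (String × String)) : Bool :=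
  decide (pvVal sub "runtime" < pvVal best "runtime") ||
    (decide (pvVal sub "runtime" = pvVal best "runtime") &&
      decide (pvVal sub "memory" < pvVal best "memory"))

-- title_slug = sub['titleSlug']; best_submissions[title_slug] under the contains-check is getD []
def pvStepA (best : PySem.Dict String (List (String × String))) (sub : List (String × String)) :
    PySem.Dict String (List (String × String)) :=
  if !best.contains (pvVal sub "titleSlug") then best.insert (pvVal sub "titleSlug") sub
  else if pvBetter sub (best.getD (pvVal sub "titleSlug") []) then
    best.insert (pvVal sub "titleSlug") sub
  else best

def get_best_submissions_py (submissions : List (List (String × String))) :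
    List (String × List (String × String)) :=
  (submissions.foldl pvStepA PySem.Dict.empty).items

-- ===== PORT B =====
-- groups.setdefault(sub['titleSlug'], []).append(sub)  =  modify slug [] (· ++ [sub])
def pvGroup (submissions : List (List (String × String))) :
    PySem.Dict String (List (List (String × String))) :=
  submissions.foldl (fun g sub => g.modify (pvVal sub "titleSlug") [] (fun xs => xs ++ [sub]))
    PySem.Dict.empty

-- (sub['runtime'], sub['memory']) < (winner['runtime'], winner['memory']): Python compares the
-- first components with == and falls to the second only on equality.
def pvTupleLt (s b : List (String × String)) : Bool :=
  if pvVal s "runtime" == pvVal b "runtime" then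
    decide (pvVal s "memory" < pvVal b "memory")
  else decide (pvVal s "runtime" < pvVal b "runtime")

-- winner = subs[0]; for sub in subs[1:]: replace on strict tuple-less; groups are nonempty by
-- construction, so the [] case is unreachable and its value never shows in the result.
def pvBestOf (subs : List (List (String × String))) : List (String × String) :=
  match subs with
  | [] => []
  | h :: t => t.foldl (fun w s => if pvTupleLt s w then s else w) h

def get_best_submissions_py_alt (submissions : List (List (String × String))) :
    List (String × List (String × String)) :=
  (pvGroup submissions).items.map (fun p => (p.1, pvBestOf p.2))

-- ===== PRECONDITION & SPEC =====
def pvHasKey (sub : List (String × String)) (k : String) : Bool :=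
  (sub.find? (fun p => p.1 == k)).isSome

-- Exactly the inputs on which Python A returns: every submission has a 'titleSlug', and every
-- submission whose slug occurs more than once also has 'runtime' and 'memory' (A reads those two
-- keys precisely on the members of multiply-occurring slugs; elsewhere it raises KeyError).
def Pre_get_best_submissions_py (submissions : List (List (String × String))) : Prop :=
  ∀ sub ∈ submissions,
    pvHasKey sub "titleSlug" = true ∧
      (2 ≤ submissions.countP (fun s => pvVal s "titleSlug" == pvVal sub "titleSlug") →
        pvHasKey sub "runtime" = true ∧ pvHasKey sub "memory" = true)

instance (submissions : List (List (String × String))) :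
    Decidable (Pre_get_best_submissions_py submissions) := by
  unfold Pre_get_best_submissions_py; infer_instance

def pvWitness_get_best_submissions_py : (List (List (String × String))) :=
  [[("titleSlug", "two-sum"), ("runtime", "4 ms"), ("memory", "13 MB")]]

def Spec_get_best_submissions_py (submissions : List (List (String × String)))
    (out : List (String × List (String × String))) : Prop :=
  out = get_best_submissions_py_alt submissions

instance (submissions : List (List (String × String)))
    (out : List (String × List (String × String))) :
    Decidable (Spec_get_best_submissions_py submissions out) := by
  unfold Spec_get_best_submissions_py; infer_instance

-- ===== CLAIM (what is proved, stated in full; the proofs are below) =====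
def Claim_equal_get_best_submissions_py : Prop :=
  ∀ (submissions : List (List (String × String))), Dom_get_best_submissions_py submissions →
    Pre_get_best_submissions_py submissions →
    Spec_get_best_submissions_py submissions (get_best_submissions_py submissions)

-- ===== LEMMAS AND PROOFS =====

theorem pvKey_stepA (d : PySem.Dict String (List (String × String)))
    (s : List (String × String)) :
    (pvStepA d s).keys = PySem.Set.add d.keys (pvVal s "titleSlug") := by
  unfold pvStepA
  by_cases h : d.contains (pvVal s "titleSlug")
  · rw [PySem.Set.add_of_mem (by simpa [PySem.Dict.contains_iff_mem_keys] using h)]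
    simp only [h, Bool.not_true, Bool.false_eq_true, if_false]
    split
    · exact PySem.Dict.keys_insert_of_contains _ _ h
    · rfl
  · rw [PySem.Set.add_of_not_mem (by simpa [PySem.Dict.contains_iff_mem_keys] using h)]
    rw [Bool.not_eq_true] at h
    simp only [h, Bool.not_false, if_true]
    exact PySem.Dict.keys_insert_of_not_contains _ _ h

theorem pvKeys_foldA (l : List (List (String × String)))
    (d : PySem.Dict String (List (String × String))) :
    (l.foldl pvStepA d).keys = PySem.Set.update d.keys (l.map (fun s => pvVal s "titleSlug")) := by
  induction l generalizing d with
  | nil => simp [PySem.Set.update_nil]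
  | cons s t ih =>
    simp only [List.foldl_cons, List.map_cons, PySem.Set.update_cons]
    rw [ih, pvKey_stepA]

theorem pvGet_foldA (l : List (List (String × String)))
    (d : PySem.Dict String (List (String × String))) (k : String) :
    (l.foldl pvStepA d).get? k =
      (l.filter (fun s => pvVal s "titleSlug" == k)).foldl
        (fun o s => match o with
          | none => some s
          | some m => if pvBetter s m then some s else some m)
        (d.get? k) := by
  induction l generalizing d with
  | nil => rfl
  | cons s t ih =>
    simp only [List.foldl_cons, List.filter_cons]
    by_cases hk : pvVal s "titleSlug" = k
    · subst hk
      simp only [beq_self_eq_true, if_true, List.foldl_cons]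
      rw [ih]
      congr 1
      unfold pvStepA
      by_cases hc : d.contains (pvVal s "titleSlug")
      · have hs : (d.get? (pvVal s "titleSlug")).isSome := by
          rw [← PySem.Dict.contains_eq_isSome_get?]; exact hc
        obtain ⟨m, hm⟩ := Option.isSome_iff_exists.mp hs
        have hgd : d.getD (pvVal s "titleSlug") [] = m := by
          rw [PySem.Dict.getD_eq_get?_getD, hm]; rfl
        simp only [hc, Bool.not_true, Bool.false_eq_true, if_false, hgd, hm]
        split
        · rw [PySem.Dict.get?_insert_self]
        · exact hm
      · rw [Bool.not_eq_true] at hc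
        have hn : d.get? (pvVal s "titleSlug") = none :=
          (PySem.Dict.get?_eq_none_iff_contains d _).mpr hc
        simp only [hc, Bool.not_false, if_true, hn, PySem.Dict.get?_insert_self]
    · have hb : (pvVal s "titleSlug" == k) = false := by simpa using hk
      simp only [hb, Bool.false_eq_true, if_false]
      rw [ih]
      congr 1
      unfold pvStepA
      have hne : k ≠ pvVal s "titleSlug" := fun h => hk h.symm
      split
      · exact PySem.Dict.get?_insert_of_ne _ _ hne
      · split
        · exact PySem.Dict.get?_insert_of_ne _ _ hne
        · rfl

theorem pvTupleLt_eq_better (s m : List (String × String)) :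
    pvTupleLt s m = pvBetter s m := by
  unfold pvTupleLt pvBetter
  by_cases h : pvVal s "runtime" = pvVal m "runtime"
  · simp [h]
  · simp [h]

theorem pvFold_some (t : List (List (String × String))) (h : List (String × String)) :
    t.foldl (fun o s => match o with
        | none => some s
        | some m => if pvBetter s m then some s else some m) (some h) =
      some (t.foldl (fun w s => if pvBetter s w then s else w) h) := by
  induction t generalizing h with
  | nil => rfl
  | cons a t ih =>
    simp only [List.foldl_cons]
    split <;> rw [ih]

theorem pvFold_eq_bestOf (xs : List (List (String × String))) :
    (xs.foldl (fun o s => match o with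
        | none => some s
        | some m => if pvBetter s m then some s else some m) none).getD [] =
      pvBestOf xs := by
  cases xs with
  | nil => rfl
  | cons h t =>
    simp only [List.foldl_cons, pvBestOf, pvFold_some, Option.getD_some]
    apply PySem.List.foldl_congr_mem
    intro acc x _
    rw [pvTupleLt_eq_better]

theorem pvGroup_getD (l : List (List (String × String))) (k : String) :
    (pvGroup l).getD k [] = l.filter (fun s => pvVal s "titleSlug" == k) := by
  unfold pvGroup
  have hmap : l.foldl (fun g sub => g.modify (pvVal sub "titleSlug") [] (fun xs => xs ++ [sub]))
        PySem.Dict.empty =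
      (l.map (fun s => (pvVal s "titleSlug", s))).foldl
        (fun g p => g.modify p.1 [] (fun xs => xs ++ [p.2])) PySem.Dict.empty := by
    rw [List.foldl_map]
  rw [hmap, PySem.Dict.getD_foldl_modify_append, PySem.Dict.getD_empty, List.nil_append,
    List.filter_map]
  simp [Function.comp_def]

theorem pvGroup_keys (l : List (List (String × String))) :
    (pvGroup l).keys = PySem.Set.ofList (l.map (fun s => pvVal s "titleSlug")) := by
  unfold pvGroup
  rw [PySem.Dict.keys_foldl_modify_key, PySem.Dict.keys_empty, PySem.Set.update_nil_left]

-- ===== VERDICT (by name: the statement is the Claim_ definition above) =====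
theorem get_best_submissions_py_spec : Claim_equal_get_best_submissions_py := by
  intro l _ _
  unfold Spec_get_best_submissions_py get_best_submissions_py get_best_submissions_py_alt
  have hkA : (l.foldl pvStepA PySem.Dict.empty).keys =
      PySem.Set.ofList (l.map (fun s => pvVal s "titleSlug")) := by
    rw [pvKeys_foldA, PySem.Dict.keys_empty, PySem.Set.update_nil_left]
  have hkB := pvGroup_keys l
  have hndA : (l.foldl pvStepA PySem.Dict.empty).keys.Nodup := by
    rw [hkA]; exact PySem.Set.nodup_ofList _
  have hndB : (pvGroup l).keys.Nodup := by
    rw [hkB]; exact PySem.Set.nodup_ofList _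
  rw [PySem.Dict.items_eq_map_keys _ hndA ([] : List (String × String)),
    PySem.Dict.items_eq_map_keys _ hndB ([] : List (List (String × String))),
    List.map_map, hkA, hkB]
  apply List.map_congr_left
  intro k _
  simp only [Function.comp_def]
  congr 1
  rw [pvGroup_getD, PySem.Dict.getD_eq_get?_getD, pvGet_foldA, PySem.Dict.get?_empty,
    pvFold_eq_bestOf]
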